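-- pv_equiv track=rewrite | github.com/yadnyeshdande/industrial_oil_can_vision_system | gui/unified_gui.py | _tab_hit
-- ===== SOURCE A (Python) =====
-- from typing import Dict, List, Optional, Tuple
--
-- TABS    = ["Dashboard", "Camera View", "System Health", "Logs Viewer"]
--
-- TAB_H   = 42
--
-- def _tab_hit(x: int, y: int, W: int) -> Optional[int]:
--     if y > TAB_H:
--         return None
--     tw = W // len(TABS)
--     for i in range(len(TABS)):
--         if i * tw <= x < (i + 1) * tw:
--             return i
--     return None
-- ===== SOURCE B (Python) =====
-- TABS    = ["Dashboard", "Camera View", "System Health", "Logs Viewer"]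
-- TAB_H   = 42
--
-- def _tab_hit(x, y, W):
--     if y > TAB_H:
--         return None
--     tw = W // len(TABS)
--     if tw <= 0 or x < 0 or x >= len(TABS) * tw:
--         return None
--     return x // tw
-- ===== Notes on version B (the rewrite author's own statement) =====
-- stated objective: simpler
-- what changed: Replaces the linear scan over the four tab buckets with a closed-form floor-division index guarded by a range check.
import Mathlib
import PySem

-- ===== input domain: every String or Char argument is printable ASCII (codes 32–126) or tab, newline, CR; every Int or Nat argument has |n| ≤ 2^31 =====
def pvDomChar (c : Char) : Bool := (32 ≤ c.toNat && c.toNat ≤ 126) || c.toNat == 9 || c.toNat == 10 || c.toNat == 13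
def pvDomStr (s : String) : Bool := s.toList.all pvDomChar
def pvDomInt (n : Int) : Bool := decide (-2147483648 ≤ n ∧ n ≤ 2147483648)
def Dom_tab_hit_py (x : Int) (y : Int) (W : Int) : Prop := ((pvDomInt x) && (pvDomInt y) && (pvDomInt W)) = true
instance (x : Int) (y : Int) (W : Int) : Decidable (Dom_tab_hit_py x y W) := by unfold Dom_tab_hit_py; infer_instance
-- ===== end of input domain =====

-- B replaces A's linear bucket scan with a closed-form floor-division index plus a range guard (simpler, same results).


-- ===== PORT A =====
-- Loop of A: first i in [0,1,2,3] with i*tw <= x < (i+1)*tw.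
def tabHitLoop (x tw : Int) : List Int → Option Int
  | [] => none
  | i :: rest => if i * tw ≤ x ∧ x < (i + 1) * tw then some i else tabHitLoop x tw rest

def tab_hit_py (x : Int) (y : Int) (W : Int) : Option Int :=
  if y > 42 then none
  else
    let tw := PySem.Int.floordiv W 4
    tabHitLoop x tw (PySem.List.pyRange 0 4 1)

-- ===== PORT B =====
-- B: closed-form bucket index with a range guard, no loop.
def tab_hit_py_alt (x : Int) (y : Int) (W : Int) : Option Int :=
  if y > 42 then none
  else
    let tw := PySem.Int.floordiv W 4
    if tw ≤ 0 ∨ x < 0 ∨ 4 * tw ≤ x then none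
    else some (PySem.Int.floordiv x tw)

-- ===== PRECONDITION & SPEC =====
def Spec_tab_hit_py (x : Int) (y : Int) (W : Int) (out : Option Int) : Prop := out = tab_hit_py_alt x y W
instance (x : Int) (y : Int) (W : Int) (out : Option Int) : Decidable (Spec_tab_hit_py x y W out) := by unfold Spec_tab_hit_py; infer_instance

-- ===== CLAIM (what is proved, stated in full; the proofs are below) =====
def Claim_equal_tab_hit_py : Prop := ∀ (x : Int) (y : Int) (W : Int), Dom_tab_hit_py x y W → Spec_tab_hit_py x y W (tab_hit_py x y W)

-- ===== LEMMAS AND PROOFS =====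

-- ===== VERDICT (by name: the statement is the Claim_ definition above) =====
lemma tabHitLoop_eq (x tw : Int) :
    tabHitLoop x tw [0, 1, 2, 3] =
      (if tw ≤ 0 ∨ x < 0 ∨ 4 * tw ≤ x then none else some (PySem.Int.floordiv x tw)) := by
  by_cases hp : 0 < tw
  · simp only [tabHitLoop]
    split_ifs <;> first
      | rfl
      | omega
      | (exact congrArg some
          (((PySem.Int.floordiv_eq_iff_of_pos hp).mpr (by constructor <;> omega)).symm))
  · simp only [tabHitLoop]
    split_ifs <;> first | rfl | omega

theorem tab_hit_py_spec : Claim_equal_tab_hit_py := by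
  intro x y W _
  unfold Spec_tab_hit_py tab_hit_py tab_hit_py_alt
  by_cases hy : y > 42
  · simp [hy]
  · simp only [hy, if_false]
    have : PySem.List.pyRange 0 4 1 = [0, 1, 2, 3] := by decide
    rw [this, tabHitLoop_eq]
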